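-- pv_equiv track=rewrite | github.com/ajamaloodin/myTrainingPath | Certified Python Course/ejercicios/prueba.py | add_inventory
-- ===== SOURCE A (Python) =====
-- def create_inventory(items):
--     invent = {}
--     long = len(items)
--     procesada = []
--     for index, item in enumerate(items):
--         if item not in procesada:
--             count = 1
--             index2 = index + 1
--             while index2 < long and item not in procesada:
--                 if item in items[index2::]:
--                     count += 1
--                 index2 += 1
--             invent[item] = count
--             procesada.append(item)
--     return invent
--
-- def add_inventory(inventory, items):
--
--     items.sort()
--     nuevos = create_inventory(items)
--
--     for key, value in nuevos.items():
--         if inventory.get(key, 'nei') == 'nei':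
--             inventory[key] = value
--         else:
--             inventory[key] = inventory[key] + value
--     return inventory
-- ===== SOURCE B (Python) =====
-- def add_inventory(inventory, items):
--     # Single pass: sort items (as A does, in place), then bump each occurrence
--     # directly into inventory -- no intermediate count dict.
--     items.sort()
--     for item in items:
--         if item in inventory:
--             inventory[item] = inventory[item] + 1
--         else:
--             inventory[item] = 1
--     return inventory
-- ===== Notes on version B (the rewrite author's own statement) =====
-- stated objective: faster
-- what changed: Replaced A's quadratic create_inventory (per-distinct-item while loop scanning list slices) and its separate merge loop with a single linear pass over the sorted items that increments the inventory entry once per occurrence.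
import Mathlib
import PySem

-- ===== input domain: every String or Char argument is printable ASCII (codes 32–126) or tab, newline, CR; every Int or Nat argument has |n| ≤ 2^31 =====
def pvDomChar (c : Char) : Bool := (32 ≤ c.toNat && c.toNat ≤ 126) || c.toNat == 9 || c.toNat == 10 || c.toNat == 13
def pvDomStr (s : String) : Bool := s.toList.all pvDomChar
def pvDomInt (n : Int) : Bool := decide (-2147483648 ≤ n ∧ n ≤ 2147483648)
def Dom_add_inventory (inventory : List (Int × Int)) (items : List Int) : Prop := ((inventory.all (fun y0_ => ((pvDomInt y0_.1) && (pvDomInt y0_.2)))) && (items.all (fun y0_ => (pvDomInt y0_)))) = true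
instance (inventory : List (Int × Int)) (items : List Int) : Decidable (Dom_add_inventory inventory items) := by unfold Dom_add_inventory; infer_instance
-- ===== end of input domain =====

-- B replaces A's quadratic create_inventory + merge with one linear pass over the sorted
-- items, incrementing inventory once per occurrence. Both A and B sort 'items' in place and
-- mutate 'inventory' in place; the equivalence proved here is about the returned value.

-- ===== PORT A =====
-- the inner 'while index2 < long and item not in procesada' loop of create_inventory
def ciWhile (items : List Int) (long : Int) (item : Int) (procesada : List Int)
    (index2 count : Int) : Int :=
  if h : index2 < long ∧ item ∉ procesada then
    ciWhile items long item procesada (index2 + 1)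
      (if item ∈ PySem.List.slice items (some index2) none then count + 1 else count)
  else count
termination_by (long - index2).toNat
decreasing_by omega

-- the body of create_inventory's 'for index, item in enumerate(items)' loop
def ciStep (items : List Int) (long : Int) (st : PySem.Dict Int Int × List Int)
    (p : Int × Int) : PySem.Dict Int Int × List Int :=
  if p.2 ∉ st.2 then
    (st.1.insert p.2 (ciWhile items long p.2 st.2 (p.1 + 1) 1), st.2 ++ [p.2])
  else st

def create_inventory (items : List Int) : PySem.Dict Int Int :=
  let long : Int := items.length
  ((PySem.List.enumerate items).foldl (ciStep items long) (PySem.Dict.empty, [])).1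

-- the body of add_inventory's 'for key, value in nuevos.items()' loop;
-- inventory.get(key, 'nei') == 'nei': the values are ints, so the sentinel test is "key absent"
def mergeStep (inv : PySem.Dict Int Int) (p : Int × Int) : PySem.Dict Int Int :=
  match inv.get? p.1 with
  | none => inv.insert p.1 p.2
  | some v => inv.insert p.1 (v + p.2)

def add_inventory (inventory : List (Int × Int)) (items : List Int) : List (Int × Int) :=
  let items := PySem.List.sorted items (fun x => x) false
  let nuevos := create_inventory items
  (nuevos.items.foldl mergeStep (PySem.Dict.mk inventory)).items

-- ===== PORT B =====
-- loop body: 'if item in inventory: inventory[item] = inventory[item] + 1 else: inventory[item] = 1'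
-- (inventory[item] exists in the first branch, so getD is the exact lookup)
def incrStep (inv : PySem.Dict Int Int) (x : Int) : PySem.Dict Int Int :=
  if inv.contains x then inv.insert x (inv.getD x 0 + 1) else inv.insert x 1

def add_inventory_alt (inventory : List (Int × Int)) (items : List Int) : List (Int × Int) :=
  let items := PySem.List.sorted items (fun x => x) false
  (items.foldl incrStep (PySem.Dict.mk inventory)).items

-- ===== PRECONDITION & SPEC =====
def Spec_add_inventory (inventory : List (Int × Int)) (items : List Int) (out : List (Int × Int)) : Prop := out = add_inventory_alt inventory items
instance (inventory : List (Int × Int)) (items : List Int) (out : List (Int × Int)) : Decidable (Spec_add_inventory inventory items out) := by unfold Spec_add_inventory; infer_instance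

-- ===== CLAIM (what is proved, stated in full; the proofs are below) =====
def Claim_equal_add_inventory : Prop := ∀ (inventory : List (Int × Int)) (items : List Int), Dom_add_inventory inventory items → Spec_add_inventory inventory items (add_inventory inventory items)

-- ===== LEMMAS AND PROOFS =====

lemma ciWhile_eq (s : List Int) (long item : Int) (P : List Int) (hP : item ∉ P)
    (i c : Int) :
    ciWhile s long item P i c
      = c + ((PySem.List.pyRange i long 1).countP
              (fun j => decide (item ∈ PySem.List.slice s (some j) none)) : Nat) := by
  by_cases hil : i < long
  · rw [ciWhile, dif_pos ⟨hil, hP⟩, ciWhile_eq s long item P hP (i+1),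
        PySem.List.pyRange_one_cons hil, List.countP_cons]
    by_cases hm : item ∈ PySem.List.slice s (some i) none <;>
      first
        | (simp [hm]; ring)
        | simp [hm]
  · rw [ciWhile, dif_neg (by tauto), PySem.List.pyRange_one_eq_nil (by omega)]
    simp
termination_by (long - i).toNat
decreasing_by omega

lemma skip_run (s : List Int) (long x₀ : Int) (k : Nat) :
    ∀ (i : Int) (st : PySem.Dict Int Int × List Int), x₀ ∈ st.2 →
    (PySem.List.enumerate (List.replicate k x₀) i).foldl (ciStep s long) st = st := by
  induction k with
  | zero => intro i st h; simp [PySem.List.enumerate_nil]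
  | succ k ih =>
    intro i st h
    rw [List.replicate_succ, PySem.List.enumerate_cons, List.foldl_cons]
    rw [show ciStep s long st (i, x₀) = st from if_neg (by simp [h])]
    exact ih _ _ h

lemma not_mem_dropWhile (x₀ : Int) :
    ∀ t' : List Int, t'.Pairwise (· ≤ ·) → (∀ y ∈ t', x₀ ≤ y) →
      x₀ ∉ t'.dropWhile (fun y => y == x₀) := by
  intro t'
  induction t' with
  | nil => simp
  | cons a t'' ih =>
    intro hp hb
    by_cases ha : a = x₀
    · rw [List.dropWhile_cons_of_pos (by simp [ha])]
      exact ih hp.of_cons (fun y hy => hb y (List.mem_cons_of_mem _ hy))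
    · rw [List.dropWhile_cons_of_neg (by simp [ha])]
      intro hmem
      rcases List.mem_cons.mp hmem with h | h
      · exact ha h.symm
      · exact ha (le_antisymm (hb a (List.mem_cons_self)) (List.rel_of_pairwise_cons hp h)).symm

lemma run_decomp (t : List Int) (hne : t ≠ []) (hs : t.Pairwise (· ≤ ·)) :
    ∃ (m : Nat) (x₀ : Int) (u : List Int),
      t = List.replicate (m+1) x₀ ++ u ∧ x₀ ∉ u ∧ u.Pairwise (· ≤ ·) := by
  obtain ⟨x₀, t', rfl⟩ := List.exists_cons_of_ne_nil hne
  have hrep : t'.takeWhile (fun y => y == x₀)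
      = List.replicate (t'.takeWhile (fun y => y == x₀)).length x₀ := by
    apply List.eq_replicate_of_mem
    intro b hb
    simpa using List.mem_takeWhile_imp hb
  refine ⟨(t'.takeWhile (fun y => y == x₀)).length, x₀, t'.dropWhile (fun y => y == x₀),
      ?_, ?_, ?_⟩
  · rw [List.replicate_succ, List.cons_append]
    congr 1
    conv_lhs => rw [← List.takeWhile_append_dropWhile (p := fun y => y == x₀) (l := t'), hrep]
  · exact not_mem_dropWhile x₀ t' hs.of_cons (fun y hy => List.rel_of_pairwise_cons hs hy)
  · exact hs.of_cons.sublist (List.dropWhile_sublist _)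

lemma ofList_replicate_succ (m : Nat) (x₀ : Int) :
    PySem.Set.ofList (List.replicate (m+1) x₀) = [x₀] := by
  induction m with
  | zero => rfl
  | succ m ih =>
    rw [List.replicate_succ, PySem.Set.ofList_cons, ih]
    simp [PySem.Set.discard]

lemma dedup_run (m : Nat) (x₀ : Int) (u : List Int) (hx : x₀ ∉ u) :
    PySem.List.dedup (List.replicate (m+1) x₀ ++ u) = x₀ :: PySem.List.dedup u := by
  rw [PySem.List.dedup_eq_ofList, PySem.Set.ofList_append, ofList_replicate_succ,
      PySem.Set.update_eq_append_filter]
  have : ∀ y ∈ PySem.Set.ofList u, (!PySem.Set.contains [x₀] y) = true := by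
    intro y hy
    have : y ∈ u := (PySem.Set.mem_ofList u y).mp hy
    simp [PySem.Set.contains]
    rintro rfl; exact hx this
  rw [List.filter_eq_self.mpr this]
  simp

lemma rep_incr (m : Nat) (x₀ : Int) (d : PySem.Dict Int Int) :
    (List.replicate (m+1) x₀).foldl incrStep d = mergeStep d (x₀, ((m : Int)+1)) := by
  induction m generalizing d with
  | zero =>
    simp only [List.replicate_succ, List.replicate_zero, List.foldl_cons, List.foldl_nil]
    unfold incrStep mergeStep
    cases h : d.get? x₀ with
    | none =>
      rw [show d.contains x₀ = false by rw [PySem.Dict.contains_eq_isSome_get?, h]; rfl]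
      norm_num
    | some v =>
      rw [show d.contains x₀ = true by rw [PySem.Dict.contains_eq_isSome_get?, h]; rfl,
          PySem.Dict.getD_of_get?_eq_some d 0 h]
      norm_num
  | succ m ih =>
    rw [List.replicate_succ, List.foldl_cons, ih]
    unfold incrStep mergeStep
    cases h : d.get? x₀ with
    | none =>
      rw [show d.contains x₀ = false by rw [PySem.Dict.contains_eq_isSome_get?, h]; rfl]
      simp only [Bool.false_eq_true, if_false, PySem.Dict.get?_insert_self,
        PySem.Dict.insert_insert_self]
      congr 1; push_cast; ring
    | some v =>
      rw [show d.contains x₀ = true by rw [PySem.Dict.contains_eq_isSome_get?, h]; rfl,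
          PySem.Dict.getD_of_get?_eq_some d 0 h]
      simp only [if_true, PySem.Dict.get?_insert_self, PySem.Dict.insert_insert_self]
      congr 1; push_cast; ring

lemma merge_eq_incr (n : Nat) :
    ∀ (t : List Int), t.length = n → t.Pairwise (· ≤ ·) →
    ∀ (d : PySem.Dict Int Int),
    ((PySem.List.dedup t).map (fun x => (x, (t.count x : Int)))).foldl mergeStep d
      = t.foldl incrStep d := by
  induction n using Nat.strong_induction_on with
  | _ n ih =>
    intro t hlen hp d
    rcases eq_or_ne t [] with rfl | hne
    · simp [PySem.List.dedup]
    obtain ⟨m, x₀, u, rfl, hx, hup⟩ := run_decomp t hne hp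
    have hcx : (List.replicate (m+1) x₀ ++ u).count x₀ = m + 1 := by
      rw [List.count_append, List.count_replicate, if_pos (by simp),
          List.count_eq_zero_of_not_mem hx]
    have hcu : ∀ x ∈ PySem.List.dedup u,
        (List.replicate (m+1) x₀ ++ u).count x = u.count x := by
      intro x hxu
      have hxm : x ∈ u := by
        rw [PySem.List.dedup_eq_ofList] at hxu
        exact (PySem.Set.mem_ofList u x).mp hxu
      have hxne : x ≠ x₀ := fun h => hx (h ▸ hxm)
      simp [List.count_append, List.count_replicate, Ne.symm hxne]
    rw [dedup_run m x₀ u hx, List.map_cons, List.foldl_cons,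
        List.map_congr_left (fun x hxu => by rw [hcu x hxu]),
        hcx]
    rw [List.foldl_append, rep_incr]
    have hlt : u.length < n := by
      rw [List.length_append, List.length_replicate] at hlen; omega
    rw [show ((↑(m+1) : Int)) = ((m : Int) + 1) by push_cast; ring]
    exact ih u.length hlt u rfl hup _

lemma fold_run (s : List Int) (n : Nat) :
    ∀ (t : List Int) (off : Nat) (inv : PySem.Dict Int Int) (P : List Int),
    t.length = n → t.Pairwise (· ≤ ·) → List.drop off s = t →
    (∀ x ∈ t, x ∉ P) → (∀ x ∈ t, inv.contains x = false) →
    ((PySem.List.enumerate t (off : Int)).foldl (ciStep s (s.length : Int)) (inv, P)).1.items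
      = inv.items ++ (PySem.List.dedup t).map (fun x => (x, (t.count x : Int))) := by
  induction n using Nat.strong_induction_on with
  | _ n ih =>
    intro t off inv P hlen hp hdrop hP hinv
    rcases eq_or_ne t [] with rfl | hne
    · simp [PySem.List.enumerate_nil, PySem.List.dedup]
    obtain ⟨m, x₀, u, rfl, hx, hup⟩ := run_decomp t hne hp
    have hx0t : x₀ ∈ List.replicate (m+1) x₀ ++ u := by
      simp [List.mem_append]
    have hslen : s.length = off + (m + 1) + u.length := by
      have := congrArg List.length hdrop
      rw [List.length_drop, List.length_append, List.length_replicate] at this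
      have hoff : off ≤ s.length := by
        by_contra h
        rw [List.drop_eq_nil_of_le (by omega)] at hdrop
        exact hne hdrop.symm
      omega
    -- the membership test that ciWhile's count performs, evaluated on the run
    have hmem : ∀ k : Nat,
        (x₀ ∈ PySem.List.slice s (some ((off : Int) + 1 + (k : Int))) none) ↔ k < m := by
      intro k
      rw [PySem.List.slice_from s (by positivity)]
      have h1 : ((off : Int) + 1 + (k : Int)).toNat = off + (1 + k) := by omega
      rw [h1, ← List.drop_drop, hdrop, List.drop_append, List.drop_replicate,
          List.length_replicate]
      constructor
      · intro hmem'
        by_contra hk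
        rw [show m + 1 - (1 + k) = 0 from by omega] at hmem'
        simp only [List.replicate_zero, List.nil_append] at hmem'
        exact hx (List.drop_subset _ _ hmem')
      · intro hk
        apply List.mem_append.mpr
        left
        rw [show m + 1 - (1 + k) = m - k from by omega]
        exact List.mem_replicate.mpr ⟨by omega, rfl⟩
    -- the count computed for x₀ at its first index
    have hcount : ciWhile s (s.length : Int) x₀ P ((off : Int) + 1) 1 = (m : Int) + 1 := by
      rw [ciWhile_eq s _ x₀ P (hP x₀ hx0t) _ 1, PySem.List.pyRange_one, List.countP_map]
      have hN : (((s.length : Int)) - ((off : Int) + 1)).toNat = m + u.length := by omega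
      rw [hN]
      have hcongr : List.countP
            ((fun j => decide (x₀ ∈ PySem.List.slice s (some j) none)) ∘ fun k : Nat => (off : Int) + 1 + (k : Int))
            (List.range (m + u.length))
          = List.countP (fun k : Nat => decide (k < m)) (List.range (m + u.length)) := by
        apply List.countP_congr
        intro k _
        simp only [Function.comp]
        rw [decide_eq_true_eq, decide_eq_true_eq]
        exact hmem k
      rw [hcongr, List.range_add, List.countP_append,
          List.countP_eq_length.mpr (fun a ha => decide_eq_true (List.mem_range.mp ha)),
          List.countP_map,
          List.countP_eq_zero.mpr (fun a _ => by simp [Function.comp])]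
      simp [List.length_range]
      ring
    -- unroll the first run
    rw [List.replicate_succ, List.cons_append, PySem.List.enumerate_cons, List.foldl_cons]
    rw [show ciStep s (s.length : Int) (inv, P) ((off : Int), x₀)
          = (inv.insert x₀ ((m : Int) + 1), P ++ [x₀]) from by
      unfold ciStep
      rw [if_pos (by simpa using hP x₀ hx0t)]
      simp only
      rw [hcount]]
    rw [PySem.List.enumerate_append, List.foldl_append,
        skip_run s _ x₀ m _ _ (by simp),
        List.length_replicate]
    -- recurse on the tail u
    have hdru : List.drop (off + m + 1) s = u := by
      rw [show off + m + 1 = off + (m + 1) from by omega,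
          ← List.drop_drop (i := m + 1) (j := off), hdrop,
          List.drop_append, List.drop_replicate, List.length_replicate]
      simp
    have hun : u.length < n := by
      rw [List.length_append, List.length_replicate] at hlen; omega
    have hrec := ih u.length hun u (off + m + 1) (inv.insert x₀ ((m : Int) + 1))
        (P ++ [x₀]) rfl hup hdru
        (fun x hxu => by
          have hxne : x ≠ x₀ := fun h => hx (h ▸ hxu)
          intro hmem'
          rcases List.mem_append.mp hmem' with h | h
          · exact hP x (by simp [hxu]) h
          · exact hxne (by simpa using h))
        (fun x hxu => by
          have hxne : x ≠ x₀ := fun h => hx (h ▸ hxu)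
          rw [PySem.Dict.contains_insert]
          simp [hxne, hinv x (by simp [List.mem_append, hxu])])
    rw [show (off : Int) + 1 + (m : Int) = ((off + m + 1 : Nat) : Int) from by push_cast; ring,
        hrec,
        PySem.Dict.items_insert_of_not_contains inv _ (hinv x₀ hx0t)]
    -- right-hand side: dedup and counts of the run
    rw [show x₀ :: (List.replicate m x₀ ++ u) = List.replicate (m+1) x₀ ++ u from by
          rw [List.replicate_succ, List.cons_append],
        dedup_run m x₀ u hx, List.map_cons]
    have hcx : (List.replicate (m+1) x₀ ++ u).count x₀ = m + 1 := by
      rw [List.count_append, List.count_replicate, if_pos (by simp),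
          List.count_eq_zero_of_not_mem hx]
    rw [hcx]
    rw [List.map_congr_left (l := PySem.List.dedup u)
        (f := fun x => (x, ((List.replicate (m+1) x₀ ++ u).count x : Int)))
        (g := fun x => (x, (u.count x : Int)))
        (fun x hxu => by
          have hxm : x ∈ u := by
            rw [PySem.List.dedup_eq_ofList] at hxu
            exact (PySem.Set.mem_ofList u x).mp hxu
          have hxne : x ≠ x₀ := fun h => hx (h ▸ hxm)
          simp [List.count_append, List.count_replicate, Ne.symm hxne])]
    push_cast
    simp [List.append_assoc]

lemma create_inventory_items (s : List Int) (hs : s.Pairwise (· ≤ ·)) :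
    (create_inventory s).items
      = (PySem.List.dedup s).map (fun x => (x, (s.count x : Int))) := by
  have h := fold_run s s.length s 0 PySem.Dict.empty [] rfl hs (by simp)
      (by simp) (fun x _ => PySem.Dict.contains_empty x)
  unfold create_inventory
  simpa [PySem.Dict.items] using h

-- ===== VERDICT (by name: the statement is the Claim_ definition above) =====
theorem add_inventory_spec : Claim_equal_add_inventory := by
  intro inventory items _
  simp only [Spec_add_inventory, add_inventory, add_inventory_alt]
  have hp : (PySem.List.sorted items (fun x => x) false).Pairwise (· ≤ ·) :=
    PySem.List.sorted_pairwise items (fun x => x)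
  rw [create_inventory_items _ hp, merge_eq_incr _ _ rfl hp]
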